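-- pv_equiv track=rewrite | github.com/NOAA-National-Severe-Storms-Laboratory/BinMod1D-PARS | bin_integrals.py | compute_coeffs
-- ===== SOURCE A (Python) =====
-- import math
--
-- def kronecker_delta(i, j):
--     return 1 if i == j else 0
--
-- def compute_coeffs(px, py, m, a, b, c, d):
--     coeffs = {}
--     for i in range(px, px + m + 2):       # possible x exponents
--         for j in range(py, py + m + 2):   # possible y exponents
--             Cij = 0
--
--             # term with "a"
--             k = i - px
--             if 0 <= k <= m:
--                 Cij += a * math.comb(m, k) * kronecker_delta(j, py + m - k)
--
--             # term with "b*x"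
--             k = i - px - 1
--             if 0 <= k <= m:
--                 Cij += b * math.comb(m, k) * kronecker_delta(j, py + m - k)
--
--             # term with "c*y"
--             k = i - px
--             if 0 <= k <= m:
--                 Cij += c * math.comb(m, k) * kronecker_delta(j, py + m - k + 1)
--
--             # term with "d*x*y"
--             k = i - px - 1
--             if 0 <= k <= m:
--                 Cij += d * math.comb(m, k) * kronecker_delta(j, py + m - k + 1)
--
--             if Cij != 0:
--                 coeffs[(i, j)] = Cij
--
--     return coeffs
-- ===== SOURCE B (Python) =====
-- import math
--
-- def compute_coeffs(px, py, m, a, b, c, d):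
--     # Emit only the (at most three) nonzero cells per x-exponent offset s,
--     # in the same increasing-(i,j) insertion order A produces.
--     coeffs = {}
--     for s in range(m + 2):
--         v0 = a * math.comb(m, s) if s <= m else 0
--         v1 = (b * math.comb(m, s - 1) if s >= 1 else 0) + (c * math.comb(m, s) if s <= m else 0)
--         v2 = d * math.comb(m, s - 1) if s >= 1 else 0
--         i = px + s
--         if v0 != 0:
--             coeffs[(i, py + m - s)] = v0
--         if v1 != 0:
--             coeffs[(i, py + m + 1 - s)] = v1
--         if v2 != 0:
--             coeffs[(i, py + m + 2 - s)] = v2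
--     return coeffs
-- ===== Notes on version B (the rewrite author's own statement) =====
-- stated objective: faster
-- what changed: Instead of scanning all (m+2)^2 grid cells (i,j) and testing four Kronecker deltas at each, B iterates once over the x-exponent offset s=0..m+1 and directly emits the at most three nonzero cells of that column, in the same increasing-(i,j) insertion order A produces.
import Mathlib
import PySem

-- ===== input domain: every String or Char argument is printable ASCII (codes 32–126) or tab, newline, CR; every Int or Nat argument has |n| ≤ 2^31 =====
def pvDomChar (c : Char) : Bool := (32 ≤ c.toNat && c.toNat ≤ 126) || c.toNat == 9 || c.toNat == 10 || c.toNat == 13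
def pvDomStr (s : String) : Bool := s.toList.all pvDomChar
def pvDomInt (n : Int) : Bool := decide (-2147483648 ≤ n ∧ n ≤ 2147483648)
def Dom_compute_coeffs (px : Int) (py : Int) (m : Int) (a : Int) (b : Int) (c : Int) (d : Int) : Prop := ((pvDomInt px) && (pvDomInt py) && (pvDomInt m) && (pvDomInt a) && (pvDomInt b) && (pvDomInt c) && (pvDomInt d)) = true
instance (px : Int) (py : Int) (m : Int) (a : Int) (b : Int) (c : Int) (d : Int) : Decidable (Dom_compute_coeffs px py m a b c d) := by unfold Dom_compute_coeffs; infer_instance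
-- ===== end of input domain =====

-- B replaces A's scan of the whole (m+2)x(m+2) grid of (i,j) cells by a single pass over
-- the x-exponent offset s that emits the at most three nonzero cells of that column
-- directly, in A's exact insertion order (objective: faster).

-- ===== PORT A =====
def kronecker_delta (i : Int) (j : Int) : Int := if i = j then 1 else 0

-- math.comb(n, k); every call site guards 0 ≤ k ≤ n, where Nat.choose is exact
def pyComb (n : Int) (k : Int) : Int := (Nat.choose n.toNat k.toNat : Int)

-- the body of A's inner loop accumulating Cij (the four `+=` lines, in order; s = i - px)
def computeCij (py : Int) (m : Int) (a : Int) (b : Int) (c : Int) (d : Int) (s : Int) (j : Int) : Int :=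
  (if 0 ≤ s ∧ s ≤ m then a * pyComb m s * kronecker_delta j (py + m - s) else 0)
  + (if 0 ≤ s - 1 ∧ s - 1 ≤ m then b * pyComb m (s - 1) * kronecker_delta j (py + m - (s - 1)) else 0)
  + (if 0 ≤ s ∧ s ≤ m then c * pyComb m s * kronecker_delta j (py + m - s + 1) else 0)
  + (if 0 ≤ s - 1 ∧ s - 1 ≤ m then d * pyComb m (s - 1) * kronecker_delta j (py + m - (s - 1) + 1) else 0)

def aInner (px : Int) (py : Int) (m : Int) (a : Int) (b : Int) (c : Int) (d : Int) (i : Int)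
    (coeffs : PySem.Dict (Int × Int) Int) (j : Int) : PySem.Dict (Int × Int) Int :=
  let Cij := computeCij py m a b c d (i - px) j
  if Cij ≠ 0 then coeffs.insert (i, j) Cij else coeffs

def aOuter (px : Int) (py : Int) (m : Int) (a : Int) (b : Int) (c : Int) (d : Int)
    (coeffs : PySem.Dict (Int × Int) Int) (i : Int) : PySem.Dict (Int × Int) Int :=
  (PySem.List.pyRange py (py + m + 2) 1).foldl (aInner px py m a b c d i) coeffs

def compute_coeffs (px : Int) (py : Int) (m : Int) (a : Int) (b : Int) (c : Int) (d : Int) : List (Int × Int × Int) :=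
  let coeffs := (PySem.List.pyRange px (px + m + 2) 1).foldl (aOuter px py m a b c d) PySem.Dict.empty
  coeffs.items.map (fun p => (p.1.1, p.1.2, p.2))

-- ===== PORT B =====
def bStep (px : Int) (py : Int) (m : Int) (a : Int) (b : Int) (c : Int) (d : Int)
    (coeffs : PySem.Dict (Int × Int) Int) (s : Int) : PySem.Dict (Int × Int) Int :=
  let v0 := if s ≤ m then a * pyComb m s else 0
  let v1 := (if 1 ≤ s then b * pyComb m (s - 1) else 0) + (if s ≤ m then c * pyComb m s else 0)
  let v2 := if 1 ≤ s then d * pyComb m (s - 1) else 0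
  let i := px + s
  let coeffs := if v0 ≠ 0 then coeffs.insert (i, py + m - s) v0 else coeffs
  let coeffs := if v1 ≠ 0 then coeffs.insert (i, py + m + 1 - s) v1 else coeffs
  if v2 ≠ 0 then coeffs.insert (i, py + m + 2 - s) v2 else coeffs

def compute_coeffs_alt (px : Int) (py : Int) (m : Int) (a : Int) (b : Int) (c : Int) (d : Int) : List (Int × Int × Int) :=
  let coeffs := (PySem.List.pyRange 0 (m + 2) 1).foldl (bStep px py m a b c d) PySem.Dict.empty
  coeffs.items.map (fun p => (p.1.1, p.1.2, p.2))

-- ===== PRECONDITION & SPEC =====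
def Spec_compute_coeffs (px : Int) (py : Int) (m : Int) (a : Int) (b : Int) (c : Int) (d : Int) (out : List (Int × Int × Int)) : Prop := out = compute_coeffs_alt px py m a b c d
instance (px : Int) (py : Int) (m : Int) (a : Int) (b : Int) (c : Int) (d : Int) (out : List (Int × Int × Int)) : Decidable (Spec_compute_coeffs px py m a b c d out) := by unfold Spec_compute_coeffs; infer_instance

-- ===== CLAIM (what is proved, stated in full; the proofs are below) =====
def Claim_equal_compute_coeffs : Prop := ∀ (px : Int) (py : Int) (m : Int) (a : Int) (b : Int) (c : Int) (d : Int), Dom_compute_coeffs px py m a b c d → Spec_compute_coeffs px py m a b c d (compute_coeffs px py m a b c d)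

-- ===== LEMMAS AND PROOFS =====

-- the per-s values B emits
def bv0 (m : Int) (a : Int) (s : Int) : Int := if s ≤ m then a * pyComb m s else 0
def bv1 (m : Int) (b : Int) (c : Int) (s : Int) : Int :=
  (if 1 ≤ s then b * pyComb m (s - 1) else 0) + (if s ≤ m then c * pyComb m s else 0)
def bv2 (m : Int) (d : Int) (s : Int) : Int := if 1 ≤ s then d * pyComb m (s - 1) else 0

-- the (at most three) items contributed at x-exponent px + s, in increasing-j order
def ent (px : Int) (py : Int) (m : Int) (a : Int) (b : Int) (c : Int) (d : Int) (s : Int) :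
    List ((Int × Int) × Int) :=
  (if bv0 m a s ≠ 0 then [((px + s, py + m - s), bv0 m a s)] else [])
  ++ (if bv1 m b c s ≠ 0 then [((px + s, py + m + 1 - s), bv1 m b c s)] else [])
  ++ (if bv2 m d s ≠ 0 then [((px + s, py + m + 2 - s), bv2 m d s)] else [])

theorem ent_fst {px py m a b c d s : Int} {p : (Int × Int) × Int}
    (hp : p ∈ ent px py m a b c d s) : p.1.1 = px + s := by
  unfold ent at hp
  simp only [List.mem_append] at hp
  rcases hp with (h | h) | h <;> split_ifs at h <;> simp_all

-- conditional insert with a fresh key appends to items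
theorem items_cond_insert (dd : PySem.Dict (Int × Int) Int) (k : Int × Int) (v : Int)
    (h : ∀ p ∈ dd.items, p.1 ≠ k) :
    (if v ≠ 0 then dd.insert k v else dd).items
      = dd.items ++ (if v ≠ 0 then [(k, v)] else []) := by
  have hc : dd.contains k = false := by
    rw [← Bool.not_eq_true, PySem.Dict.contains_iff_mem_keys]
    simp only [PySem.Dict.keys, List.mem_map]
    rintro ⟨p, hp, hpk⟩
    exact h p hp hpk
  split_ifs with hv
  · rw [PySem.Dict.items_insert_of_not_contains _ _ hc]
  · simp

-- A's Cij vanishes away from the three interesting columns …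
theorem cij_zero (py m a b c d s j : Int)
    (h0 : j ≠ py + m - s) (h1 : j ≠ py + m + 1 - s) (h2 : j ≠ py + m + 2 - s) :
    computeCij py m a b c d s j = 0 := by
  unfold computeCij kronecker_delta
  split_ifs <;> omega

-- … and on them it computes exactly the values B emits
theorem cij_at0 (py m a b c d s : Int) (hs : 0 ≤ s) :
    computeCij py m a b c d s (py + m - s) = bv0 m a s := by
  unfold computeCij kronecker_delta bv0
  split_ifs <;> omega

theorem cij_at1 (py m a b c d s : Int) (hs : 0 ≤ s) (hsm : s ≤ m + 1) :
    computeCij py m a b c d s (py + m + 1 - s) = bv1 m b c s := by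
  unfold computeCij kronecker_delta bv1
  split_ifs <;> omega

theorem cij_at2 (py m a b c d s : Int) (_hs : 0 ≤ s) (hsm : s ≤ m + 1) :
    computeCij py m a b c d s (py + m + 2 - s) = bv2 m d s := by
  unfold computeCij kronecker_delta bv2
  split_ifs <;> omega

-- generic: a fold of conditional inserts over fresh, distinct keys appends the filterMap
theorem fold_insert_fresh (i : Int) (g : Int → Int) :
    ∀ (l : List Int), l.Nodup → ∀ (dd : PySem.Dict (Int × Int) Int),
      (∀ j ∈ l, ∀ p ∈ dd.items, p.1 ≠ (i, j)) →
      (l.foldl (fun dd j => if g j ≠ 0 then dd.insert (i, j) (g j) else dd) dd).items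
        = dd.items ++ l.filterMap (fun j => if g j ≠ 0 then some ((i, j), g j) else none) := by
  intro l
  induction l with
  | nil => intro _ dd _; simp
  | cons j t ih =>
    intro hnd dd hfresh
    simp only [List.foldl_cons, List.filterMap_cons]
    have hstep := items_cond_insert dd (i, j) (g j) (hfresh j (by simp))
    have htail : ∀ j' ∈ t, ∀ p ∈ (if g j ≠ 0 then dd.insert (i, j) (g j) else dd).items, p.1 ≠ (i, j') := by
      intro j' hj' p hp
      rw [hstep] at hp
      rcases List.mem_append.1 hp with hp | hp
      · exact hfresh j' (by simp [hj']) p hp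
      · have hjj : j ≠ j' := by
          rintro rfl; exact (List.nodup_cons.1 hnd).1 hj'
        split_ifs at hp <;> simp_all
    rw [ih (List.nodup_cons.1 hnd).2 _ htail, hstep]
    split_ifs <;> simp

-- the filterMap of A's Cij over the whole inner range is exactly ent s
theorem filterMap_cij_range (px py m a b c d s : Int) (hs : 0 ≤ s) (hsm : s ≤ m + 1) :
    (PySem.List.pyRange py (py + m + 2) 1).filterMap
        (fun j => if computeCij py m a b c d s j ≠ 0
                  then some ((px + s, j), computeCij py m a b c d s j) else none)
      = ent px py m a b c d s := by
  set F : Int → Option ((Int × Int) × Int) :=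
    (fun j => if computeCij py m a b c d s j ≠ 0
              then some ((px + s, j), computeCij py m a b c d s j) else none) with hF
  have hzero : ∀ (lo hi : Int), (∀ j, lo ≤ j → j < hi →
      j ≠ py + m - s ∧ j ≠ py + m + 1 - s ∧ j ≠ py + m + 2 - s) →
      (PySem.List.pyRange lo hi 1).filterMap F = [] := by
    intro lo hi h
    rw [List.filterMap_eq_nil_iff]
    intro j hj
    rw [PySem.List.mem_pyRange_one] at hj
    obtain ⟨h0, h1, h2⟩ := h j hj.1 hj.2
    simp [hF, cij_zero py m a b c d s j h0 h1 h2]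
  rw [PySem.List.pyRange_one_append py (py + m + 1 - s) (py + m + 2) (by omega) (by omega),
      List.filterMap_append]
  rw [PySem.List.pyRange_one_cons (show py + m + 1 - s < py + m + 2 by omega),
      List.filterMap_cons]
  have hT : (PySem.List.pyRange (py + m + 1 - s + 1) (py + m + 2) 1).filterMap F
      = if bv2 m d s ≠ 0 then [((px + s, py + m + 2 - s), bv2 m d s)] else [] := by
    by_cases hs1 : 1 ≤ s
    · rw [PySem.List.pyRange_one_cons (show py + m + 1 - s + 1 < py + m + 2 by omega),
          List.filterMap_cons]
      rw [hzero (py + m + 1 - s + 1 + 1) (py + m + 2) (by intro j h1 h2; omega)]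
      rw [show py + m + 1 - s + 1 = py + m + 2 - s by ring]
      simp only [hF, cij_at2 py m a b c d s hs hsm]
      split_ifs <;> simp
    · have hs0 : s = 0 := by omega
      rw [PySem.List.pyRange_one_eq_nil (by omega)]
      simp [bv2, hs0]
  have hH : (PySem.List.pyRange py (py + m + 1 - s) 1).filterMap F
      = if bv0 m a s ≠ 0 then [((px + s, py + m - s), bv0 m a s)] else [] := by
    by_cases hsm' : s ≤ m
    · rw [show py + m + 1 - s = (py + m - s) + 1 by ring,
          PySem.List.pyRange_one_succ_right (by omega), List.filterMap_append,
          hzero py (py + m - s) (by intro j h1 h2; omega)]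
      simp only [List.filterMap_cons, List.filterMap_nil, hF,
        cij_at0 py m a b c d s hs]
      split_ifs <;> simp
    · rw [PySem.List.pyRange_one_eq_nil (by omega)]
      have : bv0 m a s = 0 := by simp [bv0, hsm']
      simp [this]
  rw [hT, hH]
  simp only [hF, cij_at1 py m a b c d s hs hsm]
  unfold ent
  split_ifs <;> simp

-- the inner loop of A at i = px + s contributes exactly ent s
theorem a_inner_items (px py m a b c d s : Int) (hs : 0 ≤ s) (hsm : s ≤ m + 1)
    (dd : PySem.Dict (Int × Int) Int) (hfresh : ∀ p ∈ dd.items, p.1.1 ≠ px + s) :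
    ((PySem.List.pyRange py (py + m + 2) 1).foldl (aInner px py m a b c d (px + s)) dd).items
      = dd.items ++ ent px py m a b c d s := by
  have hfun : aInner px py m a b c d (px + s)
      = fun dd j => if computeCij py m a b c d s j ≠ 0
                    then dd.insert (px + s, j) (computeCij py m a b c d s j) else dd := by
    funext dd j
    simp only [aInner]
    rw [show px + s - px = s by ring]
  rw [hfun,
    fold_insert_fresh (px + s) (computeCij py m a b c d s) _
      (PySem.List.nodup_pyRange_one py (py + m + 2)) dd
      (by intro j _ p hp he; exact hfresh p hp (by rw [he])),
    filterMap_cij_range px py m a b c d s hs hsm]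

-- one step of B contributes exactly ent s
theorem b_step_items (px py m a b c d s : Int)
    (dd : PySem.Dict (Int × Int) Int) (hfresh : ∀ p ∈ dd.items, p.1.1 ≠ px + s) :
    (bStep px py m a b c d dd s).items = dd.items ++ ent px py m a b c d s := by
  unfold bStep
  have h0 : ∀ p ∈ dd.items, p.1 ≠ (px + s, py + m - s) := by
    intro p hp he; exact hfresh p hp (by rw [he])
  set d1 := if bv0 m a s ≠ 0 then dd.insert (px + s, py + m - s) (bv0 m a s) else dd with hd1
  have hi1 : d1.items = dd.items ++ (if bv0 m a s ≠ 0 then [((px + s, py + m - s), bv0 m a s)] else []) :=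
    items_cond_insert dd _ _ h0
  have h1 : ∀ p ∈ d1.items, p.1 ≠ (px + s, py + m + 1 - s) := by
    intro p hp he
    rw [hi1] at hp
    rcases List.mem_append.1 hp with hp | hp
    · exact hfresh p hp (by rw [he])
    · split_ifs at hp <;> simp_all
  set d2 := if bv1 m b c s ≠ 0 then d1.insert (px + s, py + m + 1 - s) (bv1 m b c s) else d1 with hd2
  have hi2 : d2.items = d1.items ++ (if bv1 m b c s ≠ 0 then [((px + s, py + m + 1 - s), bv1 m b c s)] else []) :=
    items_cond_insert d1 _ _ h1
  have h2 : ∀ p ∈ d2.items, p.1 ≠ (px + s, py + m + 2 - s) := by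
    intro p hp he
    rw [hi2, hi1] at hp
    rcases List.mem_append.1 hp with hp | hp
    · rcases List.mem_append.1 hp with hp | hp
      · exact hfresh p hp (by rw [he])
      · split_ifs at hp <;> simp_all
    · split_ifs at hp <;> simp_all
  have hi3 := items_cond_insert d2 (px + s, py + m + 2 - s) (bv2 m d s) h2
  show (if bv2 m d s ≠ 0 then d2.insert (px + s, py + m + 2 - s) (bv2 m d s) else d2).items = _
  rw [hi3, hi2, hi1]
  unfold ent
  simp [List.append_assoc]

-- freshness of column px + n over the first n columns' items
theorem flatten_fresh (px py m a b c d : Int) (n : Nat)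
    {p : (Int × Int) × Int}
    (hp : p ∈ ((List.range n).map (fun k : Nat => ent px py m a b c d (k : Int))).flatten) :
    p.1.1 ≠ px + (n : Int) := by
  simp only [List.mem_flatten, List.mem_map, List.mem_range] at hp
  obtain ⟨l, ⟨k, hk, rfl⟩, hpl⟩ := hp
  rw [ent_fst hpl]
  have : (k : Int) < (n : Int) := by exact_mod_cast hk
  omega

theorem a_fold_items (px py m a b c d : Int) :
    ∀ (n : Nat), (∀ k : Nat, k < n → (k : Int) ≤ m + 1) →
      (((List.range n).map (fun k : Nat => px + (k : Int))).foldl (aOuter px py m a b c d) PySem.Dict.empty).items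
        = ((List.range n).map (fun k : Nat => ent px py m a b c d (k : Int))).flatten := by
  intro n
  induction n with
  | zero => intro _; rfl
  | succ n ih =>
    intro h
    rw [List.range_succ, List.map_append, List.foldl_append, List.map_append, List.flatten_append]
    have ihh := ih (fun k hk => h k (Nat.lt_succ_of_lt hk))
    simp only [List.map_cons, List.map_nil, List.foldl_cons, List.foldl_nil,
      List.flatten_cons, List.flatten_nil, List.append_nil]
    rw [aOuter,
      a_inner_items px py m a b c d (n : Int) (by exact_mod_cast Nat.zero_le n)
        (h n (Nat.lt_succ_self n)) _
        (fun p hp => by rw [ihh] at hp; exact flatten_fresh px py m a b c d n hp),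
      ihh]

theorem b_fold_items (px py m a b c d : Int) :
    ∀ (n : Nat),
      (((List.range n).map (fun k : Nat => (k : Int))).foldl (bStep px py m a b c d) PySem.Dict.empty).items
        = ((List.range n).map (fun k : Nat => ent px py m a b c d (k : Int))).flatten := by
  intro n
  induction n with
  | zero => rfl
  | succ n ih =>
    rw [List.range_succ, List.map_append, List.foldl_append, List.map_append, List.flatten_append]
    simp only [List.map_cons, List.map_nil, List.foldl_cons, List.foldl_nil,
      List.flatten_cons, List.flatten_nil, List.append_nil]
    rw [b_step_items px py m a b c d (n : Int) _
        (fun p hp => by rw [ih] at hp; exact flatten_fresh px py m a b c d n hp),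
      ih]

-- ===== VERDICT (by name: the statement is the Claim_ definition above) =====
theorem compute_coeffs_spec : Claim_equal_compute_coeffs := by
  intro px py m a b c d _
  simp only [Spec_compute_coeffs, compute_coeffs, compute_coeffs_alt]
  have hA : PySem.List.pyRange px (px + m + 2) 1
      = (List.range (m + 2).toNat).map (fun k : Nat => px + (k : Int)) := by
    rw [PySem.List.pyRange_one, show px + m + 2 - px = m + 2 by ring]
  have hB : PySem.List.pyRange 0 (m + 2) 1
      = (List.range (m + 2).toNat).map (fun k : Nat => (k : Int)) := by
    rw [PySem.List.pyRange_one, show m + 2 - 0 = m + 2 by ring]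
    simp only [zero_add]
  have hk : ∀ k : Nat, k < (m + 2).toNat → (k : Int) ≤ m + 1 := by
    intro k hkk
    have := (Int.lt_toNat).1 (by exact_mod_cast hkk : (k : Int).toNat < (m + 2).toNat)
    omega
  rw [hA, hB, a_fold_items px py m a b c d (m + 2).toNat hk,
    b_fold_items px py m a b c d (m + 2).toNat]
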